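-- pv_equiv track=rewrite | github.com/danielbanariba/analizador-lexico | analizador_lexico/python_analyzer/lexer.py | parse_fstring
-- ===== SOURCE A (Python) =====
-- def parse_fstring(fstring):
--     components = []
--     current_text = ""
--     in_expression = False
--
--     for char in fstring:
--         if char == '{' and not in_expression:
--             if current_text:
--                 components.append(('text', current_text))
--                 current_text = ""
--             in_expression = True
--         elif char == '}' and in_expression:
--             if current_text:
--                 components.append(('expression', current_text.strip()))
--                 current_text = ""
--             in_expression = False
--         else:
--             current_text += char
--
--     if current_text:
--         components.append(('text', current_text))
--
--     return components
-- ===== SOURCE B (Python) =====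
-- def parse_fstring(fstring):
--     components = []
--     i = 0
--     n = len(fstring)
--     while i < n:
--         j = fstring.find('{', i)
--         if j == -1:
--             components.append(('text', fstring[i:]))
--             break
--         if j > i:
--             components.append(('text', fstring[i:j]))
--         k = fstring.find('}', j + 1)
--         if k == -1:
--             if j + 1 < n:
--                 components.append(('text', fstring[j + 1:]))
--             break
--         content = fstring[j + 1:k]
--         if content:
--             components.append(('expression', content.strip()))
--         i = k + 1
--     return components
-- ===== Notes on version B (the rewrite author's own statement) =====
-- stated objective: faster
-- what changed: Replaced the per-character state machine (boolean flag plus a text accumulator grown by repeated string concatenation) with an index-based segment scanner that locates each opening and closing brace via str.find and slices whole text/expression segments at once.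
import Mathlib
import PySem

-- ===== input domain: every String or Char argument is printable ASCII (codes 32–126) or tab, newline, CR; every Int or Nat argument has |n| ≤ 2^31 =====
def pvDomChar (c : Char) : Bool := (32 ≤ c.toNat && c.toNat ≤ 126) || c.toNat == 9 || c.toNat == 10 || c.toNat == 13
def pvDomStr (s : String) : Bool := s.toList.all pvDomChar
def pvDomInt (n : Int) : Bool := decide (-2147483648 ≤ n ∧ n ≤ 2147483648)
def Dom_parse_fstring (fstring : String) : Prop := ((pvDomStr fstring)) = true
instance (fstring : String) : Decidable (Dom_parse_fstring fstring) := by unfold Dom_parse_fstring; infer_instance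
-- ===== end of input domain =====

-- B replaces A's per-character state machine with an index-free segment scanner that splits
-- whole text/expression segments at each '{' / '}' (objective: alternative decomposition).

-- ===== PORT A =====
-- for-loop over the characters with state (components, current_text, in_expression),
-- then the final flush of current_text; literal transliteration of A.
def parse_fstring_loop : List Char → List (String × String) → List Char → Bool → List (String × String)
  | [], comps, cur, _ =>
      comps ++ (if cur = [] then [] else [("text", String.mk cur)])
  | c :: cs, comps, cur, inE =>
      if c = '{' ∧ inE = false then
        parse_fstring_loop cs
          (comps ++ (if cur = [] then [] else [("text", String.mk cur)])) [] true
      else if c = '}' ∧ inE = true then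
        parse_fstring_loop cs
          (comps ++ (if cur = [] then [] else [("expression", String.mk (PySem.Chars.strip cur))])) [] false
      else
        parse_fstring_loop cs comps (cur ++ [c]) inE

def parse_fstring (fstring : String) : List (String × String) :=
  parse_fstring_loop fstring.toList [] [] false

-- ===== PORT B =====
-- segment scanner: take the text up to the next '{', then the content up to the next '}',
-- emit both segments, recurse on the remainder (Source B's find/slice scanner on List Char).
def parse_fstring_scan (cs : List Char) : List (String × String) :=
  let t := cs.takeWhile (· ≠ '{')
  match h : cs.dropWhile (· ≠ '{') with
  | [] => if t = [] then [] else [("text", String.mk t)]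
  | _ :: rest =>
      (if t = [] then [] else [("text", String.mk t)]) ++
      (let e := rest.takeWhile (· ≠ '}')
       match h2 : rest.dropWhile (· ≠ '}') with
       | [] => if e = [] then [] else [("text", String.mk e)]
       | _ :: rest2 =>
           (if e = [] then [] else [("expression", String.mk (PySem.Chars.strip e))]) ++
           parse_fstring_scan rest2)
  termination_by cs.length
  decreasing_by
    have hd1 := List.length_dropWhile_le (fun x => x ≠ '{') cs
    have hd2 := List.length_dropWhile_le (fun x => x ≠ '}') rest
    rw [h] at hd1
    rw [h2] at hd2
    simp at hd1 hd2
    omega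

def parse_fstring_alt (fstring : String) : List (String × String) :=
  parse_fstring_scan fstring.toList

-- ===== PRECONDITION & SPEC =====
def Spec_parse_fstring (fstring : String) (out : List (String × String)) : Prop := out = parse_fstring_alt fstring
instance (fstring : String) (out : List (String × String)) : Decidable (Spec_parse_fstring fstring out) := by unfold Spec_parse_fstring; infer_instance

-- ===== CLAIM (what is proved, stated in full; the proofs are below) =====
def Claim_equal_parse_fstring : Prop := ∀ (fstring : String), Dom_parse_fstring fstring → Spec_parse_fstring fstring (parse_fstring fstring)

-- ===== LEMMAS AND PROOFS =====

-- the inner (expression) half of the scanner, as a named function for the invariant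
def pvInner (rest : List Char) : List (String × String) :=
  let e := rest.takeWhile (· ≠ '}')
  match _h2 : rest.dropWhile (· ≠ '}') with
  | [] => if e = [] then [] else [("text", String.mk e)]
  | _ :: rest2 =>
      (if e = [] then [] else [("expression", String.mk (PySem.Chars.strip e))]) ++
      parse_fstring_scan rest2

lemma scan_unfold (cs : List Char) :
    parse_fstring_scan cs =
      (if cs.takeWhile (· ≠ '{') = [] then []
       else [("text", String.mk (cs.takeWhile (· ≠ '{')))]) ++
      (match cs.dropWhile (· ≠ '{') with
       | [] => []
       | _ :: rest => pvInner rest) := by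
  rw [parse_fstring_scan.eq_def]
  cases h : cs.dropWhile (· ≠ '{') with
  | nil => simp [h]
  | cons a rest =>
      simp only [h]
      rfl

lemma takeWhile_all_append {p : Char → Bool} {l₁ l₂ : List Char}
    (h : ∀ a ∈ l₁, p a) : (l₁ ++ l₂).takeWhile p = l₁ ++ l₂.takeWhile p := by
  induction l₁ with
  | nil => simp
  | cons a l ih =>
      simp only [List.cons_append, List.takeWhile_cons]
      rw [h a (by simp), ih (fun a ha => h a (by simp [ha]))]
      simp

lemma dropWhile_all_append {p : Char → Bool} {l₁ l₂ : List Char}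
    (h : ∀ a ∈ l₁, p a) : (l₁ ++ l₂).dropWhile p = l₂.dropWhile p := by
  induction l₁ with
  | nil => simp
  | cons a l ih =>
      simp only [List.cons_append, List.dropWhile_cons]
      rw [h a (by simp)]
      exact ih (fun a ha => h a (by simp [ha]))

-- main invariant: the state machine in text mode computes the scanner's result on cur ++ cs,
-- and in expression mode computes pvInner (cur ++ cs)
lemma pvInner_nil {rest : List Char} (h : rest.dropWhile (· ≠ '}') = []) :
    pvInner rest =
      (if rest.takeWhile (· ≠ '}') = [] then []
       else [("text", String.mk (rest.takeWhile (· ≠ '}')))]) := by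
  simp only [ne_eq] at h
  unfold pvInner
  split
  · simp
  · rename_i c r2 heq
    rw [h] at heq
    cases heq

lemma pvInner_cons {rest rest2 : List Char} {c : Char}
    (h : rest.dropWhile (· ≠ '}') = c :: rest2) :
    pvInner rest =
      (if rest.takeWhile (· ≠ '}') = [] then []
       else [("expression", String.mk (PySem.Chars.strip (rest.takeWhile (· ≠ '}'))))]) ++
      parse_fstring_scan rest2 := by
  simp only [ne_eq] at h
  unfold pvInner
  split
  · rename_i heq
    rw [h] at heq
    cases heq
  · rename_i c' r2 heq
    rw [h] at heq
    cases heq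
    simp

lemma tw_app {cur l : List Char} {brace : Char} (h : ∀ c ∈ cur, c ≠ brace) :
    (cur ++ l).takeWhile (· ≠ brace) = cur ++ l.takeWhile (· ≠ brace) :=
  takeWhile_all_append (fun a ha => by simpa using h a ha)

lemma dw_app {cur l : List Char} {brace : Char} (h : ∀ c ∈ cur, c ≠ brace) :
    (cur ++ l).dropWhile (· ≠ brace) = l.dropWhile (· ≠ brace) :=
  dropWhile_all_append (fun a ha => by simpa using h a ha)

lemma pv_main (n : ℕ) : ∀ cs : List Char, cs.length ≤ n →
    (∀ comps cur, (∀ c ∈ cur, c ≠ '{') →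
        parse_fstring_loop cs comps cur false = comps ++ parse_fstring_scan (cur ++ cs)) ∧
    (∀ comps cur, (∀ c ∈ cur, c ≠ '}') →
        parse_fstring_loop cs comps cur true = comps ++ pvInner (cur ++ cs)) := by
  induction n with
  | zero =>
      intro cs hcs
      have hnil : cs = [] := List.length_eq_zero_iff.mp (Nat.le_zero.mp hcs)
      subst hnil
      constructor
      · intro comps cur hcur
        rw [scan_unfold, tw_app hcur, dw_app hcur]
        simp [parse_fstring_loop]
      · intro comps cur hcur
        rw [pvInner_nil (by simpa using dw_app (l := ([] : List Char)) hcur),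
            tw_app (l := ([] : List Char)) hcur]
        simp [parse_fstring_loop]
  | succ n ih =>
      intro cs hcs
      cases cs with
      | nil =>
          constructor
          · intro comps cur hcur
            rw [scan_unfold, tw_app hcur, dw_app hcur]
            simp [parse_fstring_loop]
          · intro comps cur hcur
            rw [pvInner_nil (by simpa using dw_app (l := ([] : List Char)) hcur),
                tw_app (l := ([] : List Char)) hcur]
            simp [parse_fstring_loop]
      | cons c cs' =>
          have hlen : cs'.length ≤ n := by simpa using Nat.le_of_succ_le_succ hcs
          constructor
          · intro comps cur hcur
            by_cases hc : c = '{'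
            · subst hc
              rw [scan_unfold, tw_app hcur, dw_app hcur]
              simp only [List.takeWhile_cons, List.dropWhile_cons]
              have hstep : parse_fstring_loop ('{' :: cs') comps cur false =
                  parse_fstring_loop cs'
                    (comps ++ (if cur = [] then [] else [("text", String.mk cur)])) [] true := by
                simp [parse_fstring_loop]
              rw [hstep, (ih cs' hlen).2 _ [] (by simp)]
              simp
            · have hstep : parse_fstring_loop (c :: cs') comps cur false =
                  parse_fstring_loop cs' comps (cur ++ [c]) false := by
                simp [parse_fstring_loop, hc]
              rw [hstep, (ih cs' hlen).1 comps (cur ++ [c])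
                    (by intro a ha; rcases List.mem_append.mp ha with h1 | h1
                        · exact hcur a h1
                        · simpa using (List.mem_singleton.mp h1) ▸ hc)]
              simp
          · intro comps cur hcur
            by_cases hc : c = '}'
            · subst hc
              have hdw : (cur ++ '}' :: cs').dropWhile (· ≠ '}') = '}' :: cs' := by
                rw [dw_app hcur]; simp
              rw [pvInner_cons hdw, tw_app hcur]
              simp only [List.takeWhile_cons]
              have hstep : parse_fstring_loop ('}' :: cs') comps cur true =
                  parse_fstring_loop cs'
                    (comps ++ (if cur = [] then []
                               else [("expression", String.mk (PySem.Chars.strip cur))])) [] false := by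
                simp [parse_fstring_loop]
              rw [hstep, (ih cs' hlen).1 _ [] (by simp)]
              simp
            · have hstep : parse_fstring_loop (c :: cs') comps cur true =
                  parse_fstring_loop cs' comps (cur ++ [c]) true := by
                simp [parse_fstring_loop, hc]
              rw [hstep, (ih cs' hlen).2 comps (cur ++ [c])
                    (by intro a ha; rcases List.mem_append.mp ha with h1 | h1
                        · exact hcur a h1
                        · simpa using (List.mem_singleton.mp h1) ▸ hc)]
              simp

-- ===== VERDICT (by name: the statement is the Claim_ definition above) =====
theorem parse_fstring_spec : Claim_equal_parse_fstring := by
  intro s _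
  unfold Spec_parse_fstring parse_fstring parse_fstring_alt
  have := (pv_main s.toList.length s.toList le_rfl).1 [] [] (by simp)
  simpa using this
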